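-- pv_equiv track=rewrite | github.com/fuhao23/BSTS-Net | utils/StatisticalUtils.py | getCommonDict
-- ===== SOURCE A (Python) =====
-- def getCommonDict(data):
--     keyset=set()
--     commonkey=list()
--     for item in data:
--         keyset.update(list(item.keys()))
--     for key in keyset:
--         all_exist=True
--         for item in data:
--             if key not in item:
--                 all_exist=False
--                 break
--         if all_exist:
--             commonkey.append(key)
--     res={item:-1 for item in commonkey}
--     for key in commonkey:
--         for item in data:
--             f_num=item[key]
--             if res[key]==-1:
--                 res[key]=f_num
--             else:
--                 if item[key]<res[key]:
--                     res[key]=item[key]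
--     return res
-- ===== SOURCE B (Python) =====
-- def getCommonDict(data):
--     if not data:
--         return {}
--     common = set(data[0])
--     for item in data[1:]:
--         common &= set(item)
--     return {k: min(item[k] for item in data) for k in common}
-- ===== Notes on version B (the rewrite author's own statement) =====
-- stated objective: simpler
-- what changed: A collects every key, tests each for membership in every dict, then recomputes a minimum per key with a -1 sentinel that is re-triggered by genuine -1 values; B intersects the key sets directly and takes a plain min per common key.
-- intended difference: On inputs where some common key's value sequence contains -1, has no value below -1, and does not end in -1, A's sentinel fold discards the stored minimum of -1 (treating it as 'unset') and returns the minimum of the values after the last -1, while B returns the true minimum -1, which is the intended value for a min-aggregation. — e.g. on getCommonDict([[("a", 3)], [("a", -1)], [("a", 5)]]): A returns [("a", 5)], B returns [("a", -1)]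
import Mathlib
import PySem

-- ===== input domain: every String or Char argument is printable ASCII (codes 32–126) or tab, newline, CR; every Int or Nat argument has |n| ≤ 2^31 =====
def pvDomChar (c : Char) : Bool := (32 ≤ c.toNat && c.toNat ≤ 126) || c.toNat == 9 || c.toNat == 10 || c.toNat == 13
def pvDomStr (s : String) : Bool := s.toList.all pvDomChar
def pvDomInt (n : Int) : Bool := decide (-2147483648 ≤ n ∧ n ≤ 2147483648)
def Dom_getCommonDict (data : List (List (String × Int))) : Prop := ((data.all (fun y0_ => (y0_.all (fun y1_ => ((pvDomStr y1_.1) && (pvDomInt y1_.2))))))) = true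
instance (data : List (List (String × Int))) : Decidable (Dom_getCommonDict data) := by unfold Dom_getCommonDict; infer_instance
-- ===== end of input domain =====

-- B intersects the key sets and takes a plain min per common key (objective: simpler);
-- where A's -1 sentinel discards a genuinely stored minimum of -1, B returns the true
-- minimum (the intended difference D_ below). Python A iterates a set (hash order, not
-- modelled); dict results are compared as dicts, ignoring order.

-- ===== PORT A =====
-- each Python dict argument arrives as an association list; Python's dict construction (last
-- value wins, a key keeps its first position) is PySem.Dict.ofList
def pvADict (item : List (String × Int)) : PySem.Dict String Int := PySem.Dict.ofList item

-- 'item[key]' — the common keys are present in every dict, so the default is never read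
def pvAGet (item : List (String × Int)) (key : String) : Int :=
  (pvADict item).getD key 0

-- 'for item in data: if key not in item: all_exist = False; break'
def pvAAllExist (key : String) : List (List (String × Int)) → Bool
  | [] => true
  | item :: rest => if (pvADict item).contains key = false then false else pvAAllExist key rest

-- body of A's innermost loop: f_num = item[key]; if res[key] == -1: … else: …
-- (key is a common key, so 'item[key]' / 'res[key]' are present; getD's default is never read)
def pvAInner (key : String) (res : PySem.Dict String Int) (item : List (String × Int)) :
    PySem.Dict String Int :=
  let fnum : Int := pvAGet item key
  if res.getD key 0 = -1 then res.insert key fnum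
  else if pvAGet item key < res.getD key 0 then
    res.insert key (pvAGet item key)
  else res

def getCommonDict (data : List (List (String × Int))) : List (String × Int) :=
  let keyset : PySem.Set String :=
    data.foldl (fun ks item => PySem.Set.update ks (pvADict item).keys) PySem.Set.empty
  let commonkey : List String :=
    keyset.foldl (fun ck key => if pvAAllExist key data then ck ++ [key] else ck) []
  let res0 : PySem.Dict String Int :=
    commonkey.foldl (fun d k => d.insert k (-1)) PySem.Dict.empty
  let res : PySem.Dict String Int :=
    commonkey.foldl (fun res key => data.foldl (pvAInner key) res) res0
  res.items

-- ===== PORT B =====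
-- 'min(item[k] for item in data)' — min of a nonempty sequence (data is nonempty on every
-- call; the [] branch is unreachable)
def pvBMin (vs : List Int) : Int :=
  match vs with
  | [] => 0
  | v :: t => t.foldl min v

def getCommonDict_alt (data : List (List (String × Int))) : List (String × Int) :=
  match data with
  | [] => []
  | d0 :: rest =>
      -- common = set(data[0]); for item in data[1:]: common &= set(item)
      let common : PySem.Set String :=
        rest.foldl
          (fun c item => PySem.Set.inter c (PySem.Set.ofList (PySem.Dict.ofList item).keys))
          (PySem.Set.ofList (PySem.Dict.ofList d0).keys)
      -- {k: min(item[k] for item in data) for k in common}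
      (common.foldl
        (fun d k =>
          d.insert k (pvBMin ((d0 :: rest).map (fun item => (PySem.Dict.ofList item).getD k 0))))
        PySem.Dict.empty).items

-- ===== PRECONDITION & SPEC =====
-- On inputs where some common key's value sequence contains -1, has no value below -1, and
-- does not end in -1, A's sentinel fold discards the stored minimum of -1 (treating it as
-- 'unset') and returns the minimum of the values after the last -1, while B returns the true
-- minimum -1, the intended value for a min-aggregation.
def D_getCommonDict (data : List (List (String × Int))) : Prop :=
  ∃ k ∈ (data.headD []).map Prod.fst,
    (∀ i ∈ data, (pvADict i).contains k = true) ∧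
    (data.map (pvAGet · k)).min? = some (-1) ∧
    (data.map (pvAGet · k)).getLastD 0 ≠ -1
instance (data : List (List (String × Int))) : Decidable (D_getCommonDict data) := by
  unfold D_getCommonDict; infer_instance

def Spec_getCommonDict (data : List (List (String × Int))) (out : List (String × Int)) : Prop := ¬ D_getCommonDict data → out = getCommonDict_alt data
instance (data : List (List (String × Int))) (out : List (String × Int)) : Decidable (Spec_getCommonDict data out) := by unfold Spec_getCommonDict; infer_instance

def pvDiffWitness_getCommonDict : (List (List (String × Int))) :=
  [[("a", 3)], [("a", -1)], [("a", 5)]]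
def pvDiffWitnessOut_getCommonDict : (List (String × Int)) × (List (String × Int)) :=
  ([("a", 5)], [("a", -1)])

-- ===== CLAIM (what is proved, stated in full; the proofs are below) =====
def Claim_unchanged_getCommonDict : Prop := ∀ (data : List (List (String × Int))), Dom_getCommonDict data → Spec_getCommonDict data (getCommonDict data)
def Claim_changed_getCommonDict : Prop := Dom_getCommonDict (pvDiffWitness_getCommonDict) ∧ D_getCommonDict (pvDiffWitness_getCommonDict) ∧ getCommonDict (pvDiffWitness_getCommonDict) = pvDiffWitnessOut_getCommonDict.1 ∧ getCommonDict_alt (pvDiffWitness_getCommonDict) = pvDiffWitnessOut_getCommonDict.2 ∧ pvDiffWitnessOut_getCommonDict.1 ≠ pvDiffWitnessOut_getCommonDict.2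
def Claim_exact_getCommonDict : Prop := ∀ (data : List (List (String × Int))), Dom_getCommonDict data → D_getCommonDict data → getCommonDict data ≠ getCommonDict_alt data

-- ===== LEMMAS AND PROOFS =====

-- the per-key 'bad value list' condition D_ captures, in the Bool form the lemmas fold over
def pvBadVals (vs : List Int) : Bool :=
  vs.contains (-1) && vs.all (fun v => decide (-1 ≤ v)) && !(vs.getLast? == some (-1))

-- the key-major characterisation A is reduced to: map over the common keys (first-occurrence
-- order) of the sentinel fold pvStep
def pvStep (c v : Int) : Int := if c = -1 then v else min c v

def pvKeyOf (data : List (List (String × Int))) : List String :=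
  data.flatMap (fun item => (pvADict item).keys)

def pvCommonB (data : List (List (String × Int))) (k : String) : Bool :=
  data.all (fun item => (pvADict item).contains k)

def pvVals (data : List (List (String × Int))) (k : String) : List Int :=
  data.map (fun item => (pvADict item).getD k 0)

def pvVal (data : List (List (String × Int))) (k : String) : Int :=
  data.foldl (fun c item => pvStep c ((pvADict item).getD k 0)) (-1)

def pvCK (data : List (List (String × Int))) : List String :=
  (PySem.Set.ofList (pvKeyOf data)).filter (fun k => pvCommonB data k)

def pvSpecFn (data : List (List (String × Int))) : List (String × Int) :=
  (pvCK data).map (fun k => (k, pvVal data k))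

def pvSpecFnB (data : List (List (String × Int))) : List (String × Int) :=
  (pvCK data).map (fun k => (k, pvBMin (pvVals data k)))

-- ---- A-side lemmas ----

theorem pv_keyset (data : List (List (String × Int))) (s : PySem.Set String) :
    data.foldl (fun ks item => PySem.Set.update ks (pvADict item).keys) s
      = PySem.Set.update s (pvKeyOf data) := by
  induction data generalizing s with
  | nil => simp [pvKeyOf, PySem.Set.update_nil]
  | cons item rest ih =>
      simp only [List.foldl_cons, pvKeyOf, List.flatMap_cons]
      rw [ih, PySem.Set.update_append]
      rfl

theorem pv_allexist (data : List (List (String × Int))) (k : String) :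
    pvAAllExist k data = pvCommonB data k := by
  induction data with
  | nil => rfl
  | cons item rest ih =>
      simp only [pvAAllExist, pvCommonB, List.all_cons]
      cases h : (pvADict item).contains k
      · simp
      · simp [ih, pvCommonB]

theorem pv_Ainner_ne (data : List (List (String × Int))) (key : String)
    (res : PySem.Dict String Int) {j : String} (hj : j ≠ key) :
    (data.foldl (pvAInner key) res).get? j = res.get? j := by
  induction data generalizing res with
  | nil => rfl
  | cons item rest ih =>
      simp only [List.foldl_cons]
      rw [ih]
      unfold pvAInner pvAGet
      split_ifs <;> simp [PySem.Dict.get?_insert_of_ne _ _ hj]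

theorem pv_step_shape (c v : Int) :
    pvStep c v = if c = -1 then v else if v < c then v else c := by
  unfold pvStep
  rw [Int.min_def]
  split_ifs <;> omega

theorem pv_Ainner_self (data : List (List (String × Int))) (key : String)
    (res : PySem.Dict String Int) :
    (data.foldl (pvAInner key) res).getD key 0
      = data.foldl (fun c item => pvStep c ((pvADict item).getD key 0)) (res.getD key 0) := by
  induction data generalizing res with
  | nil => rfl
  | cons item rest ih =>
      simp only [List.foldl_cons]
      rw [ih]
      congr 1
      rw [pv_step_shape]
      unfold pvAInner pvAGet
      split_ifs <;> simp [PySem.Dict.getD_insert_self]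

theorem pv_Ainner_keys (data : List (List (String × Int))) (key : String)
    (res : PySem.Dict String Int) (h : res.contains key = true) :
    (data.foldl (pvAInner key) res).keys = res.keys := by
  induction data generalizing res with
  | nil => rfl
  | cons item rest ih =>
      simp only [List.foldl_cons]
      have hk : (pvAInner key res item).keys = res.keys := by
        unfold pvAInner pvAGet
        split_ifs <;> simp [PySem.Dict.keys_insert_of_contains _ _ h]
      have hc : (pvAInner key res item).contains key = true := by
        rw [PySem.Dict.contains_eq_decide_mem_keys, hk,
          ← PySem.Dict.contains_eq_decide_mem_keys]
        exact h
      rw [ih _ hc, hk]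

theorem pv_outer_keys (ks : List String) (data : List (List (String × Int)))
    (res : PySem.Dict String Int) (h : ∀ k ∈ ks, res.contains k = true) :
    (ks.foldl (fun res key => data.foldl (pvAInner key) res) res).keys = res.keys := by
  induction ks generalizing res with
  | nil => rfl
  | cons a ks ih =>
      simp only [List.foldl_cons]
      have hk : (data.foldl (pvAInner a) res).keys = res.keys :=
        pv_Ainner_keys data a res (h a (by simp))
      have h' : ∀ k ∈ ks, (data.foldl (pvAInner a) res).contains k = true := by
        intro k hkk
        rw [PySem.Dict.contains_eq_decide_mem_keys, hk,
          ← PySem.Dict.contains_eq_decide_mem_keys]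
        exact h k (by simp [hkk])
      rw [ih _ h', hk]

theorem pv_outer_ne (ks : List String) (data : List (List (String × Int)))
    (res : PySem.Dict String Int) {k : String} (hk : k ∉ ks) :
    (ks.foldl (fun res key => data.foldl (pvAInner key) res) res).get? k = res.get? k := by
  induction ks generalizing res with
  | nil => rfl
  | cons a ks ih =>
      simp only [List.foldl_cons]
      have hka : k ≠ a := by intro h; exact hk (by simp [h])
      rw [ih _ (by intro h; exact hk (by simp [h])), pv_Ainner_ne data a res hka]

theorem pv_outer_getD (ks : List String) (data : List (List (String × Int)))
    (res : PySem.Dict String Int) (k : String) (hnd : ks.Nodup) (hk : k ∈ ks) :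
    (ks.foldl (fun res key => data.foldl (pvAInner key) res) res).getD k 0
      = data.foldl (fun c item => pvStep c ((pvADict item).getD k 0)) (res.getD k 0) := by
  induction ks generalizing res with
  | nil => cases hk
  | cons a ks ih =>
      simp only [List.foldl_cons]
      rcases List.mem_cons.mp hk with rfl | hmem
      · have hnot : k ∉ ks := (List.nodup_cons.mp hnd).1
        rw [PySem.Dict.getD_eq_get?_getD, pv_outer_ne ks data _ hnot,
          ← PySem.Dict.getD_eq_get?_getD, pv_Ainner_self]
      · have hka : k ≠ a := by
          rintro rfl; exact (List.nodup_cons.mp hnd).1 hmem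
        rw [ih _ (List.nodup_cons.mp hnd).2 hmem, PySem.Dict.getD_eq_get?_getD,
          pv_Ainner_ne data a res hka, ← PySem.Dict.getD_eq_get?_getD]

theorem pv_res0_ne (ks : List String) (d : PySem.Dict String Int) {k : String} (hk : k ∉ ks) :
    (ks.foldl (fun d k => d.insert k (-1 : Int)) d).get? k = d.get? k := by
  induction ks generalizing d with
  | nil => rfl
  | cons a ks ih =>
      simp only [List.foldl_cons]
      have hka : k ≠ a := by intro h; exact hk (by simp [h])
      rw [ih _ (by intro h; exact hk (by simp [h])), PySem.Dict.get?_insert_of_ne _ _ hka]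

theorem pv_res0_getD (ks : List String) (d : PySem.Dict String Int) (k : String)
    (hnd : ks.Nodup) (hk : k ∈ ks) :
    (ks.foldl (fun d k => d.insert k (-1 : Int)) d).getD k 0 = -1 := by
  induction ks generalizing d with
  | nil => cases hk
  | cons a ks ih =>
      simp only [List.foldl_cons]
      rcases List.mem_cons.mp hk with rfl | hmem
      · have hnot : k ∉ ks := (List.nodup_cons.mp hnd).1
        rw [PySem.Dict.getD_eq_get?_getD, pv_res0_ne ks _ hnot,
          PySem.Dict.get?_insert_self]
        rfl
      · exact ih _ (List.nodup_cons.mp hnd).2 hmem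

theorem pv_map_id (l : List String) : l.map (fun k => k) = l := by
  induction l with
  | nil => rfl
  | cons a l ih => simp [ih]

theorem pv_nodup_ck (data : List (List (String × Int))) : (pvCK data).Nodup :=
  (PySem.Set.nodup_ofList (pvKeyOf data)).filter _

theorem pv_portA (data : List (List (String × Int))) :
    getCommonDict data = pvSpecFn data := by
  simp only [getCommonDict]
  rw [pv_keyset data PySem.Set.empty, PySem.Set.update_empty,
    PySem.List.foldl_append_if (fun key => pvAAllExist key data) (fun k => k),
    List.nil_append, pv_map_id,
    List.filter_congr (fun k _ => pv_allexist data k)]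
  have hnod : (pvCK data).Nodup := pv_nodup_ck data
  rw [show (PySem.Set.ofList (pvKeyOf data)).filter (fun k => pvCommonB data k) = pvCK data
    from rfl]
  set ck : List String := pvCK data with hck
  set res0 : PySem.Dict String Int :=
    ck.foldl (fun d k => d.insert k (-1)) PySem.Dict.empty with hres0
  have hkeys0 : res0.keys = ck := by
    rw [hres0, PySem.Dict.keys_foldl_insert ck (fun _ _ => (-1 : Int)) PySem.Dict.empty,
      PySem.Dict.keys_empty, PySem.Set.update_nil_left,
      PySem.Set.ofList_eq_self_of_nodup ck hnod]
  have hcont : ∀ k ∈ ck, res0.contains k = true := by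
    intro k hk
    rw [PySem.Dict.contains_eq_decide_mem_keys, hkeys0]
    simp [hk]
  have hkeys : (ck.foldl (fun res key => data.foldl (pvAInner key) res) res0).keys = ck := by
    rw [pv_outer_keys ck data res0 hcont, hkeys0]
  rw [PySem.Dict.items_eq_map_keys _ (by rw [hkeys]; exact hnod) 0, hkeys]
  unfold pvSpecFn
  rw [← hck]
  refine List.map_congr_left ?_
  intro k hk
  rw [pv_outer_getD ck data res0 k hnod hk, hres0, pv_res0_getD ck PySem.Dict.empty k hnod hk]
  rfl

-- ---- membership bridges ----

theorem pv_mem_keys_foldl (ps : List (String × Int)) (d : PySem.Dict String Int) (k : String) :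
    k ∈ (ps.foldl (fun acc p => acc.insert p.1 p.2) d).keys ↔ k ∈ d.keys ∨ k ∈ ps.map Prod.fst := by
  induction ps generalizing d with
  | nil => simp
  | cons p ps ih =>
      simp only [List.foldl_cons, List.map_cons, List.mem_cons]
      rw [ih]
      rw [PySem.Dict.mem_keys_insert]
      tauto

theorem pv_mem_keys_ofList (ps : List (String × Int)) (k : String) :
    k ∈ (PySem.Dict.ofList ps).keys ↔ k ∈ ps.map Prod.fst := by
  have h := pv_mem_keys_foldl ps PySem.Dict.empty k
  simp only [PySem.Dict.keys_empty] at h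
  simpa [PySem.Dict.ofList, PySem.Dict.update] using h

theorem pv_mem_ck (data : List (List (String × Int))) (k : String) :
    k ∈ pvCK data ↔ k ∈ pvKeyOf data ∧ pvCommonB data k = true := by
  unfold pvCK
  rw [List.mem_filter, PySem.Set.mem_ofList]

-- ---- min-fold lemmas (Int) ----

theorem pv_foldmin_le_init (t : List Int) (a : Int) : t.foldl min a ≤ a := by
  induction t generalizing a with
  | nil => simp
  | cons v t ih => exact le_trans (ih (min a v)) (min_le_left a v)

theorem pv_foldmin_le_mem (t : List Int) (a x : Int) (hx : x ∈ t) : t.foldl min a ≤ x := by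
  induction t generalizing a with
  | nil => cases hx
  | cons v t ih =>
      rcases List.mem_cons.mp hx with rfl | hx'
      · exact le_trans (pv_foldmin_le_init t (min a x)) (min_le_right a x)
      · exact ih _ hx'

theorem pv_foldmin_mem (t : List Int) (a : Int) : t.foldl min a = a ∨ t.foldl min a ∈ t := by
  induction t generalizing a with
  | nil => left; rfl
  | cons v t ih =>
      rcases ih (min a v) with h | h
      · rcases min_cases a v with ⟨he, _⟩ | ⟨he, _⟩
        · left; rw [List.foldl_cons, h, he]
        · right; rw [List.foldl_cons, h, he]; exact List.mem_cons_self
      · right; exact List.mem_cons_of_mem _ h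

theorem pv_foldmin_ge (t : List Int) (a b : Int) (ha : b ≤ a) (ht : ∀ v ∈ t, b ≤ v) :
    b ≤ t.foldl min a := by
  induction t generalizing a with
  | nil => exact ha
  | cons v t ih =>
      exact ih (min a v) (le_min ha (ht v List.mem_cons_self))
        (fun w hw => ht w (List.mem_cons_of_mem _ hw))

-- foldl min a (v::s') is the plain minimum of v::s' once some member of v::s' is ≤ a
theorem pv_foldmin_drop (a w v : Int) (s' : List Int)
    (hw : w ∈ v :: s') (hwa : w ≤ a) :
    (v :: s').foldl min a = s'.foldl min v := by
  have hlev : s'.foldl min v ≤ w := by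
    rcases List.mem_cons.mp hw with h | hw'
    · rw [h]; exact pv_foldmin_le_init s' v
    · exact pv_foldmin_le_mem s' v _ hw'
  have h1 : (v :: s').foldl min a ≤ s'.foldl min v := by
    rcases pv_foldmin_mem s' v with h | h
    · rw [h]; exact pv_foldmin_le_mem _ _ _ List.mem_cons_self
    · exact pv_foldmin_le_mem _ _ _ (List.mem_cons_of_mem _ h)
  have h2 : s'.foldl min v ≤ (v :: s').foldl min a := by
    rcases pv_foldmin_mem (v :: s') a with h | h
    · rw [h]; exact le_trans hlev hwa
    · rcases List.mem_cons.mp h with he | he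
      · rw [he]; exact pv_foldmin_le_init s' v
      · exact pv_foldmin_le_mem s' v _ he
  exact le_antisymm h1 h2

-- pvStep from a state below -1 is a plain running min
theorem pv_fold_low (t : List Int) (c : Int) (hc : c < -1) :
    t.foldl pvStep c = t.foldl min c := by
  induction t generalizing c with
  | nil => rfl
  | cons v t ih =>
      simp only [List.foldl_cons]
      have h1 : pvStep c v = min c v := by unfold pvStep; rw [if_neg (by omega)]
      rw [h1, ih _ (lt_of_le_of_lt (min_le_left c v) hc)]

-- pvStep from a state above -1 over values above -1 is a plain running min
theorem pv_fold_high (t : List Int) (c : Int) (hc : -1 < c) (ht : ∀ v ∈ t, -1 < v) :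
    t.foldl pvStep c = t.foldl min c := by
  induction t generalizing c with
  | nil => rfl
  | cons v t ih =>
      simp only [List.foldl_cons]
      have hv := ht v List.mem_cons_self
      have h1 : pvStep c v = min c v := by unfold pvStep; rw [if_neg (by omega)]
      rw [h1, ih _ (lt_min hc hv) (fun w hw => ht w (List.mem_cons_of_mem _ hw))]

theorem pv_fold_ge (t : List Int) (c : Int) (hc : -1 ≤ c) (ht : ∀ v ∈ t, -1 ≤ v) :
    -1 ≤ t.foldl pvStep c := by
  induction t generalizing c with
  | nil => exact hc
  | cons v t ih =>
      simp only [List.foldl_cons]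
      have hv := ht v List.mem_cons_self
      refine ih _ ?_ (fun w hw => ht w (List.mem_cons_of_mem _ hw))
      unfold pvStep
      split_ifs <;> simp_all

-- once a value below -1 is seen, the sentinel fold is the plain minimum of the tail list
theorem pv_fold_seen (t : List Int) (c : Int) (hc : -1 ≤ c) (hm : ∃ m ∈ t, m < -1) :
    t.foldl pvStep c = pvBMin t := by
  induction t generalizing c with
  | nil => rcases hm with ⟨m, hm, _⟩; cases hm
  | cons v t ih =>
      simp only [List.foldl_cons]
      by_cases hv : v < -1
      · have h1 : pvStep c v = v := by
          unfold pvStep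
          split_ifs with h
          · rfl
          · omega
        rw [h1, pv_fold_low t v hv]
        rfl
      · rcases hm with ⟨m, hmm, hmlt⟩
        rcases List.mem_cons.mp hmm with rfl | hmt
        · omega
        · have hcv : -1 ≤ pvStep c v := by
            unfold pvStep; split_ifs <;> simp_all
          rw [ih _ hcv ⟨m, hmt, hmlt⟩]
          cases t with
          | nil => cases hmt
          | cons w s =>
              show pvBMin (w :: s) = pvBMin (v :: w :: s)
              unfold pvBMin
              simp only [List.foldl_cons]
              exact (pv_foldmin_drop v m w s hmt (by omega)).symm

-- the central lemma: on a value list that is not 'bad', A's sentinel fold IS the plain min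
theorem pv_fold_eq_min (v : Int) (t : List Int)
    (hbad : pvBadVals (v :: t) = false) :
    (v :: t).foldl pvStep (-1) = pvBMin (v :: t) := by
  simp only [List.foldl_cons]
  have h0 : pvStep (-1) v = v := by unfold pvStep; rw [if_pos rfl]
  rw [h0]
  show t.foldl pvStep v = t.foldl min v
  by_cases hv : v < -1
  · exact pv_fold_low t v hv
  · by_cases hm : ∃ m ∈ t, m < -1
    · rcases hm with ⟨m, hmt, hmlt⟩
      rw [pv_fold_seen t v (by omega) ⟨m, hmt, hmlt⟩]
      cases t with
      | nil => cases hmt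
      | cons w s =>
          show s.foldl min w = (w :: s).foldl min v
          exact (pv_foldmin_drop v m w s hmt (by omega)).symm
    · rw [not_exists] at hm
      simp only [not_and, not_lt] at hm
      have hge : ∀ x ∈ v :: t, -1 ≤ x := by
        intro x hx
        rcases List.mem_cons.mp hx with rfl | hx'
        · omega
        · exact hm x hx'
      by_cases hneg : (-1 : Int) ∈ v :: t
      · -- all values ≥ -1 and -1 occurs: ¬bad forces the last value to be -1; both sides are -1
        have hlast : (v :: t).getLast? = some (-1) := by
          simp only [pvBadVals, Bool.and_eq_false_iff, Bool.not_eq_false', beq_iff_eq] at hbad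
          rcases hbad with (hbad | hbad) | hbad
          · exact absurd hneg (by simpa using hbad)
          · exfalso
            rcases List.all_eq_false.mp hbad with ⟨x, hx, hx'⟩
            have := hge x hx
            simp at hx'
            omega
          · exact hbad
        cases t with
        | nil => rfl
        | cons w s =>
            have hlast2 : (w :: s).getLast? = some (-1) := by
              rwa [List.getLast?_cons_cons] at hlast
            obtain ⟨dl, hdl⟩ := List.getLast?_eq_some_iff.mp hlast2
            rw [hdl, List.foldl_append, List.foldl_append]
            have hdlge : ∀ x ∈ dl, -1 ≤ x := by
              intro x hx
              exact hge x (List.mem_cons_of_mem _ (hdl ▸ (List.mem_append.mpr (Or.inl hx))))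
            have hA : -1 ≤ dl.foldl pvStep v := pv_fold_ge dl v (by omega) hdlge
            have hB : -1 ≤ dl.foldl min v := pv_foldmin_ge dl v (-1) (by omega) hdlge
            simp only [List.foldl_cons, List.foldl_nil]
            have hstep : ∀ c : Int, -1 ≤ c → pvStep c (-1) = -1 := by
              intro c hcge
              unfold pvStep
              split_ifs with h
              · rfl
              · exact min_eq_right (by omega)
            rw [hstep _ hA]
            exact (min_eq_right hB).symm
      · -- all values > -1: plain running min throughout
        have hvgt : -1 < v := by
          have : v ≠ -1 := fun h => hneg (h ▸ List.mem_cons_self)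
          omega
        exact pv_fold_high t v hvgt (fun w hw => by
          have h1 := hm w hw
          have h2 : w ≠ -1 := fun h => hneg (h ▸ List.mem_cons_of_mem _ hw)
          omega)

-- ---- B-side reduction ----

theorem pv_contains_set_keys (item : List (String × Int)) (k : String) :
    PySem.Set.contains (PySem.Set.ofList (PySem.Dict.ofList item).keys) k
      = (PySem.Dict.ofList item).contains k := by
  by_cases hm : k ∈ (PySem.Dict.ofList item).keys
  · rw [PySem.Set.contains_iff _ _ |>.mpr ((PySem.Set.mem_ofList _ _).mpr hm),
      (PySem.Dict.contains_iff_mem_keys _ _).mpr hm]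
  · have h1 : PySem.Set.contains (PySem.Set.ofList (PySem.Dict.ofList item).keys) k = false := by
      cases h : PySem.Set.contains (PySem.Set.ofList (PySem.Dict.ofList item).keys) k
      · rfl
      · exact absurd ((PySem.Set.mem_ofList _ _).mp ((PySem.Set.contains_iff _ _).mp h)) hm
    have h2 : (PySem.Dict.ofList item).contains k = false := by
      cases h : (PySem.Dict.ofList item).contains k
      · rfl
      · exact absurd ((PySem.Dict.contains_iff_mem_keys _ _).mp h) hm
    rw [h1, h2]

theorem pv_interfold (rest : List (List (String × Int))) (c : PySem.Set String) :
    rest.foldl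
        (fun c item => PySem.Set.inter c (PySem.Set.ofList (PySem.Dict.ofList item).keys)) c
      = c.filter (fun k => rest.all (fun item => (PySem.Dict.ofList item).contains k)) := by
  induction rest generalizing c with
  | nil => simp
  | cons item rest ih =>
      simp only [List.foldl_cons]
      rw [ih]
      show (PySem.Set.inter c (PySem.Set.ofList (PySem.Dict.ofList item).keys)).filter _ = _
      unfold PySem.Set.inter
      rw [List.filter_filter]
      refine List.filter_congr ?_
      intro k hk
      simp only [List.all_cons]
      rw [pv_contains_set_keys, Bool.and_comm]

-- the common-key list both ports produce: data's head keys, restricted to the common ones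
theorem pv_ck_cons (d0 : List (String × Int)) (rest : List (List (String × Int))) :
    pvCK (d0 :: rest)
      = (PySem.Set.ofList (pvADict d0).keys).filter
          (fun k => rest.all (fun item => (pvADict item).contains k)) := by
  unfold pvCK pvKeyOf
  rw [List.flatMap_cons, PySem.Set.ofList_append, PySem.Set.update_eq_append_filter,
    List.filter_append]
  have h2 : ((PySem.Set.ofList (List.flatMap (fun item => (pvADict item).keys) rest)).filter
      (fun y => !(PySem.Set.contains (PySem.Set.ofList (pvADict d0).keys) y))).filter
      (fun k => pvCommonB (d0 :: rest) k) = [] := by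
    rw [List.filter_eq_nil_iff]
    intro k hk
    rw [List.mem_filter] at hk
    have hnot : k ∉ (pvADict d0).keys := by
      intro hmem
      have h2 := hk.2
      have h3 : PySem.Set.contains (PySem.Set.ofList (pvADict d0).keys) k = true :=
        (PySem.Set.contains_iff _ _).mpr ((PySem.Set.mem_ofList _ _).mpr hmem)
      rw [h3] at h2
      simp at h2
    simp only [pvCommonB, List.all_cons, Bool.and_eq_true, not_and]
    intro hc
    exact absurd ((PySem.Dict.contains_iff_mem_keys _ _).mp hc) hnot
  rw [h2, List.append_nil,
    PySem.Set.ofList_eq_self_of_nodup (pvADict d0).keys (PySem.Dict.nodup_keys_ofList d0)]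
  refine List.filter_congr ?_
  intro k hk
  simp only [pvCommonB, List.all_cons]
  rw [(PySem.Dict.contains_iff_mem_keys (pvADict d0) k).mpr hk, Bool.true_and]

theorem pv_portB (data : List (List (String × Int))) :
    getCommonDict_alt data = pvSpecFnB data := by
  cases data with
  | nil => rfl
  | cons d0 rest =>
      simp only [getCommonDict_alt]
      rw [pv_interfold]
      have hck : (PySem.Set.ofList (PySem.Dict.ofList d0).keys).filter
          (fun k => rest.all (fun item => (PySem.Dict.ofList item).contains k))
          = pvCK (d0 :: rest) := (pv_ck_cons d0 rest).symm
      rw [hck]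
      have hnod : (pvCK (d0 :: rest)).Nodup := pv_nodup_ck (d0 :: rest)
      rw [PySem.Dict.items_foldl_insert_fresh (pvCK (d0 :: rest)) (fun k => k)
        (fun k => pvBMin ((d0 :: rest).map (fun item => (PySem.Dict.ofList item).getD k 0)))
        PySem.Dict.empty
        (fun a _ => PySem.Dict.contains_empty a)
        (by rw [pv_map_id]; exact hnod)]
    -- the dict is built over fresh distinct keys, so its items are exactly the mapped list
      rw [show (PySem.Dict.empty : PySem.Dict String Int).items = [] from rfl, List.nil_append]
      unfold pvSpecFnB pvVals
      rfl

theorem pv_badVals_iff (vs : List Int) :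
    pvBadVals vs = true ↔ (-1 ∈ vs ∧ (∀ v ∈ vs, -1 ≤ v) ∧ vs.getLast? ≠ some (-1)) := by
  simp only [pvBadVals, Bool.and_eq_true, Bool.not_eq_true', beq_eq_false_iff_ne,
    List.contains_iff_mem, List.all_eq_true, decide_eq_true_eq]
  tauto

theorem pv_vals_shape (data : List (List (String × Int))) (k : String) :
    data.map (pvAGet · k) = pvVals data k := rfl

theorem pv_D_iff (data : List (List (String × Int))) :
    D_getCommonDict data
      ↔ ∃ k, k ∈ pvKeyOf data ∧ pvCommonB data k = true ∧ pvBadVals (pvVals data k) = true := by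
  unfold D_getCommonDict
  constructor
  · rintro ⟨k, hk0, hall, hmin, hlast⟩
    rw [pv_vals_shape, List.min?_eq_some_iff] at hmin
    rw [pv_vals_shape, List.getLastD_eq_getLast?] at hlast
    refine ⟨k, ?_, List.all_eq_true.mpr hall, (pv_badVals_iff _).mpr
      ⟨hmin.1, hmin.2, fun h => hlast (by rw [h]; rfl)⟩⟩
    cases data with
    | nil => simp at hk0
    | cons d0 rest =>
        unfold pvKeyOf
        rw [List.mem_flatMap]
        exact ⟨d0, List.mem_cons_self, (pv_mem_keys_ofList d0 k).mpr (by simpa using hk0)⟩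
  · rintro ⟨k, hkk, hc, hbad⟩
    rw [pv_badVals_iff] at hbad
    refine ⟨k, ?_, List.all_eq_true.mp hc, ?_, ?_⟩
    · cases data with
      | nil => simp [pvKeyOf] at hkk
      | cons d0 rest =>
          have hcd0 : (pvADict d0).contains k = true :=
            List.all_eq_true.mp hc d0 List.mem_cons_self
          simpa using (pv_mem_keys_ofList d0 k).mp
            ((PySem.Dict.contains_iff_mem_keys _ _).mp hcd0)
    · rw [pv_vals_shape, List.min?_eq_some_iff]
      exact ⟨hbad.1, hbad.2.1⟩
    · rw [pv_vals_shape, List.getLastD_eq_getLast?]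
      intro h
      rcases hgl : (pvVals data k).getLast? with _ | v
      · rw [hgl] at h; simp at h
      · rw [hgl] at h
        simp only [Option.getD_some] at h
        exact hbad.2.2 (by rw [hgl, h])

theorem pv_not_D (data : List (List (String × Int))) (hnD : ¬ D_getCommonDict data)
    (k : String) (hk : k ∈ pvKeyOf data) (hc : pvCommonB data k = true) :
    pvBadVals (pvVals data k) = false := by
  cases hb : pvBadVals (pvVals data k)
  · rfl
  · exact absurd ((pv_D_iff data).mpr ⟨k, hk, hc, hb⟩) hnD

theorem pv_val_eq_min (data : List (List (String × Int))) (k : String)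
    (hk : k ∈ pvKeyOf data) (hc : pvCommonB data k = true)
    (hnD : ¬ D_getCommonDict data) :
    pvVal data k = pvBMin (pvVals data k) := by
  have hbad := pv_not_D data hnD k hk hc
  have hv : pvVal data k = (pvVals data k).foldl pvStep (-1) := by
    unfold pvVal pvVals
    rw [List.foldl_map]
  cases data with
  | nil => cases (by simp [pvKeyOf] at hk : False)
  | cons d0 rest =>
      rw [hv]
      have hshape : pvVals (d0 :: rest) k
          = (pvADict d0).getD k 0 :: rest.map (fun item => (pvADict item).getD k 0) := by
        unfold pvVals
        rw [List.map_cons]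
      rw [hshape] at hbad ⊢
      exact pv_fold_eq_min _ _ hbad

-- A's sentinel fold and B's plain min at a key witnessing D_: A's value is not -1, B's is -1
theorem pv_val_ne_min (vs : List Int) (hbad : pvBadVals vs = true) :
    vs.foldl pvStep (-1) ≠ pvBMin vs := by
  simp only [pvBadVals, Bool.and_eq_true, Bool.not_eq_true', beq_eq_false_iff_ne] at hbad
  obtain ⟨⟨hmem, hall⟩, hlastne⟩ := hbad
  rw [List.contains_iff_mem] at hmem
  have hge : ∀ x ∈ vs, -1 ≤ x := by
    intro x hx
    have := List.all_eq_true.mp hall x hx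
    simpa using this
  have hne : vs ≠ [] := by rintro rfl; cases hmem
  -- B's plain min is -1
  have hBmin : pvBMin vs = -1 := by
    cases vs with
    | nil => cases hmem
    | cons v t =>
        show t.foldl min v = -1
        refine le_antisymm ?_ ?_
        · rcases List.mem_cons.mp hmem with h | h
          · rw [← h]; exact pv_foldmin_le_init t (-1)
          · exact pv_foldmin_le_mem t v _ h
        · exact pv_foldmin_ge t v (-1) (hge v List.mem_cons_self)
            (fun w hw => hge w (List.mem_cons_of_mem _ hw))
  -- A's sentinel fold is not -1, because the last value is not -1 and no value is below -1
  have hAne : vs.foldl pvStep (-1) ≠ -1 := by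
    have hg := vs.getLast?_eq_some_iff (a := vs.getLast hne)
    obtain ⟨dl, hdl⟩ := hg.mp (List.getLast?_eq_some_getLast hne)
    have hlne : vs.getLast hne ≠ -1 := by
      intro h
      exact hlastne (by rw [List.getLast?_eq_some_getLast hne, h])
    have hlge : -1 ≤ vs.getLast hne := hge _ (List.getLast_mem hne)
    have hdlge : ∀ x ∈ dl, -1 ≤ x := fun x hx =>
      hge x (hdl ▸ List.mem_append.mpr (Or.inl hx))
    have hA : -1 ≤ dl.foldl pvStep (-1) := pv_fold_ge dl (-1) (by omega) hdlge
    have hstep2 : ∀ c g : Int, -1 ≤ c → g ≠ -1 → pvStep c g ≠ -1 := by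
      intro c g hcge hgne
      unfold pvStep
      split_ifs with h
      · exact hgne
      · intro hmin
        rcases min_cases c g with ⟨he, _⟩ | ⟨he, _⟩ <;> rw [he] at hmin
        · exact h hmin
        · exact hgne hmin
    rw [hdl, List.foldl_append]
    simp only [List.foldl_cons, List.foldl_nil]
    exact hstep2 _ _ hA hlne
  rw [hBmin]
  exact hAne

-- ===== VERDICT (by name: the statement is the Claim_ definition above) =====
theorem getCommonDict_spec : Claim_unchanged_getCommonDict := by
  intro data _
  unfold Spec_getCommonDict
  intro hnD
  rw [pv_portA, pv_portB]
  unfold pvSpecFn pvSpecFnB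
  refine List.map_congr_left ?_
  intro k hk
  obtain ⟨hkk, hcomm⟩ := (pv_mem_ck data k).mp hk
  rw [pv_val_eq_min data k hkk hcomm hnD]

theorem getCommonDict_changed : Claim_changed_getCommonDict := by
  unfold Claim_changed_getCommonDict; decide

theorem getCommonDict_tight : Claim_exact_getCommonDict := by
  intro data _ hD heq
  rw [pv_portA, pv_portB] at heq
  unfold pvSpecFn pvSpecFnB at heq
  rw [List.map_inj_left] at heq
  obtain ⟨k, hkk, hcomm, hbad⟩ := (pv_D_iff data).mp hD
  have hk : k ∈ pvCK data := (pv_mem_ck data k).mpr ⟨hkk, hcomm⟩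
  have h := heq k hk
  rw [Prod.mk.injEq] at h
  have hv : pvVal data k = (pvVals data k).foldl pvStep (-1) := by
    unfold pvVal pvVals
    rw [List.foldl_map]
  exact pv_val_ne_min (pvVals data k) hbad (hv ▸ h.2)
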